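-- pv_equiv track=rewrite | github.com/ExpressLRS/targets_image | extract_target_list/extract_target_strings.py | extract_three_level_keys
-- ===== SOURCE A (Python) =====
-- def extract_three_level_keys(d, prefix='', depth=1):
--     keys = []
--     if isinstance(d, dict):
--         for k, v in d.items():
--             new_prefix = f"{prefix}.{k}" if prefix else k
--             if depth < 3:
--                 keys.extend(extract_three_level_keys(v, new_prefix, depth + 1))
--             elif depth == 3:
--                 keys.append(new_prefix)
--     return keys
-- ===== SOURCE B (Python) =====
-- def extract_three_level_keys(d, prefix='', depth=1):
--     # Non-recursive: case on the starting depth and collect keys with flat comprehensions.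
--     if not isinstance(d, dict):
--         return []
--     def join(p, k):
--         return f"{p}.{k}" if p else k
--     if depth == 3:
--         return [join(prefix, k) for k in d]
--     if depth == 2:
--         return [join(join(prefix, k1), k2)
--                 for k1, v1 in d.items() if isinstance(v1, dict)
--                 for k2 in v1]
--     if depth == 1:
--         return [join(join(join(prefix, k1), k2), k3)
--                 for k1, v1 in d.items() if isinstance(v1, dict)
--                 for k2, v2 in v1.items() if isinstance(v2, dict)
--                 for k3 in v2]
--     return []
-- ===== Notes on version B (the rewrite author's own statement) =====
-- stated objective: simpler
-- what changed: Replaced the polymorphic recursion with a non-recursive case analysis on the starting depth plus flat comprehensions that join keys directly.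
import Mathlib
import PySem

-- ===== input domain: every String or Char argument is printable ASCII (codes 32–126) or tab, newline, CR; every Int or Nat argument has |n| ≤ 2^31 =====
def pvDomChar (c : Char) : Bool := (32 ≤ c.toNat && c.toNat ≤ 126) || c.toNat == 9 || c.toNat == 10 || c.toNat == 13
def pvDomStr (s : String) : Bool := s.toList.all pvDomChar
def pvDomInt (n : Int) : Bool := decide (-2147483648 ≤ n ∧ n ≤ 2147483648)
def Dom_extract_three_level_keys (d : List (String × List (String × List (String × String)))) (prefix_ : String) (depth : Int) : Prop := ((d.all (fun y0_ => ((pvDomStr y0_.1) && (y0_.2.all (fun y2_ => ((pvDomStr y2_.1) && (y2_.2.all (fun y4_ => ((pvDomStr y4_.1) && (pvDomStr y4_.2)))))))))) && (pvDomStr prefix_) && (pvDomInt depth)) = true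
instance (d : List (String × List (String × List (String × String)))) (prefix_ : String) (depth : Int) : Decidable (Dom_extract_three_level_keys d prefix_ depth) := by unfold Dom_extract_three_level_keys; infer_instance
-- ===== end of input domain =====

-- B replaces A's recursion by a non-recursive case analysis on the starting depth with flat maps; objective: simpler.

-- ===== PORT A =====
-- A is polymorphically recursive over the nesting; at the fixed 3-level dict type this is
-- one copy of A's body per structural level (level-3 values are strings, so the recursive
-- call there hits 'isinstance(d, dict) == False' and returns []).
def pvExtractStr (_d : String) (_prefix : String) (_depth : Int) : List String := []

def pvExtract3 (d : List (String × String)) (prefix_ : String) (depth : Int) : List String :=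
  d.foldl (fun keys kv =>
    let new_prefix := if prefix_ ≠ "" then prefix_ ++ "." ++ kv.1 else kv.1
    if depth < 3 then keys ++ pvExtractStr kv.2 new_prefix (depth + 1)
    else if depth == 3 then keys ++ [new_prefix]
    else keys) []

def pvExtract2 (d : List (String × List (String × String))) (prefix_ : String) (depth : Int) : List String :=
  d.foldl (fun keys kv =>
    let new_prefix := if prefix_ ≠ "" then prefix_ ++ "." ++ kv.1 else kv.1
    if depth < 3 then keys ++ pvExtract3 kv.2 new_prefix (depth + 1)
    else if depth == 3 then keys ++ [new_prefix]
    else keys) []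

def extract_three_level_keys (d : List (String × List (String × List (String × String)))) (prefix_ : String) (depth : Int) : List String :=
  d.foldl (fun keys kv =>
    let new_prefix := if prefix_ ≠ "" then prefix_ ++ "." ++ kv.1 else kv.1
    if depth < 3 then keys ++ pvExtract2 kv.2 new_prefix (depth + 1)
    else if depth == 3 then keys ++ [new_prefix]
    else keys) []

-- ===== PORT B =====
def pvJoin (p k : String) : String := if p ≠ "" then p ++ "." ++ k else k

def extract_three_level_keys_alt (d : List (String × List (String × List (String × String)))) (prefix_ : String) (depth : Int) : List String :=
  if depth = 3 then d.map (fun kv => pvJoin prefix_ kv.1)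
  else if depth = 2 then
    d.flatMap (fun kv => kv.2.map (fun kv2 => pvJoin (pvJoin prefix_ kv.1) kv2.1))
  else if depth = 1 then
    d.flatMap (fun kv => kv.2.flatMap (fun kv2 =>
      kv2.2.map (fun kv3 => pvJoin (pvJoin (pvJoin prefix_ kv.1) kv2.1) kv3.1)))
  else []

-- ===== PRECONDITION & SPEC =====
def Spec_extract_three_level_keys (d : List (String × List (String × List (String × String)))) (prefix_ : String) (depth : Int) (out : List String) : Prop := out = extract_three_level_keys_alt d prefix_ depth
instance (d : List (String × List (String × List (String × String)))) (prefix_ : String) (depth : Int) (out : List String) : Decidable (Spec_extract_three_level_keys d prefix_ depth out) := by unfold Spec_extract_three_level_keys; infer_instance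

-- ===== CLAIM (what is proved, stated in full; the proofs are below) =====
def Claim_equal_extract_three_level_keys : Prop := ∀ (d : List (String × List (String × List (String × String)))) (prefix_ : String) (depth : Int), Dom_extract_three_level_keys d prefix_ depth → Spec_extract_three_level_keys d prefix_ depth (extract_three_level_keys d prefix_ depth)

-- ===== LEMMAS AND PROOFS =====
theorem pvFoldlAbs {α β : Type} {f : List α → β → List α} (g : β → List α)
    (hf : ∀ a x, f a x = a ++ g x) : ∀ (l : List β) (a : List α), l.foldl f a = a ++ l.flatMap g := by
  intro l
  induction l with
  | nil => intro a; simp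
  | cons x xs ih => intro a; simp [List.foldl_cons, hf, ih]

theorem pvExtract3_eq (d : List (String × String)) (p : String) (depth : Int) :
    pvExtract3 d p depth = if depth = 3 then d.map (fun kv => pvJoin p kv.1) else [] := by
  unfold pvExtract3
  rcases lt_trichotomy depth 3 with h | h | h
  · refine (pvFoldlAbs (fun _ => ([] : List String)) ?_ d []).trans ?_
    · intro a x; simp [h, pvExtractStr]
    · simp [show depth ≠ 3 by omega]
  · subst h
    refine (pvFoldlAbs (fun kv : String × String => [pvJoin p kv.1]) ?_ d []).trans ?_
    · intro a x; simp [pvJoin]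
    · induction d with
      | nil => rfl
      | cons y ys ih => simp [List.flatMap_cons, ih]
  · refine (pvFoldlAbs (fun _ => ([] : List String)) ?_ d []).trans ?_
    · intro a x
      simp [show ¬ depth < 3 by omega, show (depth == 3) = false by simp; omega]
    · simp [show depth ≠ 3 by omega]

theorem pvExtract2_eq (d : List (String × List (String × String))) (p : String) (depth : Int) :
    pvExtract2 d p depth =
      if depth = 3 then d.map (fun kv => pvJoin p kv.1)
      else if depth = 2 then d.flatMap (fun kv => kv.2.map (fun kv2 => pvJoin (pvJoin p kv.1) kv2.1))
      else [] := by
  unfold pvExtract2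
  by_cases h3 : depth = 3
  · subst h3
    refine (pvFoldlAbs (fun kv : String × List (String × String) => [pvJoin p kv.1]) ?_ d []).trans ?_
    · intro a x; simp [pvJoin]
    · induction d with
      | nil => rfl
      | cons y ys ih => simp [List.flatMap_cons, ih]
  · by_cases h2 : depth = 2
    · subst h2
      refine (pvFoldlAbs
        (fun kv : String × List (String × String) => kv.2.map (fun kv2 => pvJoin (pvJoin p kv.1) kv2.1))
        ?_ d []).trans ?_
      · intro a x; simp [pvExtract3_eq, pvJoin]
      · simp
    · refine (pvFoldlAbs (fun _ => ([] : List String)) ?_ d []).trans ?_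
      · intro a x
        rcases lt_trichotomy depth 3 with h | h | h
        · simp [h, pvExtract3_eq, show depth + 1 ≠ 3 by omega]
        · exact absurd h h3
        · simp [show ¬ depth < 3 by omega, show (depth == 3) = false by simp; omega]
      · simp [h3, h2]

theorem extract_three_level_keys_eq_alt (d : List (String × List (String × List (String × String)))) (p : String) (depth : Int) :
    extract_three_level_keys d p depth = extract_three_level_keys_alt d p depth := by
  unfold extract_three_level_keys extract_three_level_keys_alt
  by_cases h3 : depth = 3
  · subst h3
    refine (pvFoldlAbs (fun kv : String × List (String × List (String × String)) => [pvJoin p kv.1]) ?_ d []).trans ?_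
    · intro a x; simp [pvJoin]
    · induction d with
      | nil => rfl
      | cons y ys ih => simp [List.flatMap_cons, ih]
  · by_cases h2 : depth = 2
    · subst h2
      refine (pvFoldlAbs
        (fun kv : String × List (String × List (String × String)) =>
          kv.2.map (fun kv2 => pvJoin (pvJoin p kv.1) kv2.1)) ?_ d []).trans ?_
      · intro a x; simp [pvExtract2_eq, pvJoin]
      · simp
    · by_cases h1 : depth = 1
      · subst h1
        refine (pvFoldlAbs
          (fun kv : String × List (String × List (String × String)) =>
            kv.2.flatMap (fun kv2 => kv2.2.map (fun kv3 => pvJoin (pvJoin (pvJoin p kv.1) kv2.1) kv3.1)))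
          ?_ d []).trans ?_
        · intro a x; simp [pvExtract2_eq, pvJoin]
        · simp
      · refine (pvFoldlAbs (fun _ => ([] : List String)) ?_ d []).trans ?_
        · intro a x
          rcases lt_trichotomy depth 3 with h | h | h
          · simp [h, pvExtract2_eq, show depth + 1 ≠ 3 by omega, show depth + 1 ≠ 2 by omega]
          · exact absurd h h3
          · simp [show ¬ depth < 3 by omega, show (depth == 3) = false by simp; omega]
        · simp [h3, h2, h1]

-- ===== VERDICT (by name: the statement is the Claim_ definition above) =====
theorem extract_three_level_keys_spec : Claim_equal_extract_three_level_keys := by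
  intro d p depth _
  exact extract_three_level_keys_eq_alt d p depth
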